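-- pv_equiv track=rewrite | github.com/iamgroot42/mimir | mimir/data_utils.py | truncate_to_substring
-- ===== SOURCE A (Python) =====
-- def truncate_to_substring(text: str, substring: str, idx_occurrence: int):
--     """
--     Truncate everything after the idx_occurrence occurrence of substring
--     """
--     assert idx_occurrence > 0, "idx_occurrence must be > 0"
--     idx = -1
--     for _ in range(idx_occurrence):
--         idx = text.find(substring, idx + 1)
--         if idx == -1:
--             return text
--     return text[:idx]
-- ===== SOURCE B (Python) =====
-- def truncate_to_substring(text: str, substring: str, idx_occurrence: int):
--     """
--     Truncate everything after the idx_occurrence occurrence of substring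
--     """
--     assert idx_occurrence > 0, "idx_occurrence must be > 0"
--     starts = [i for i in range(len(text)) if text.startswith(substring, i)]
--     if idx_occurrence <= len(starts):
--         return text[:starts[idx_occurrence - 1]]
--     return text
-- ===== Notes on version B (the rewrite author's own statement) =====
-- stated objective: simpler
-- what changed: Replaces A's stateful find-loop (repeated text.find(substring, idx+1) with early return) by a single comprehension collecting all overlap-counted occurrence start positions and directly indexing the k-th one.
import Mathlib
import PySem

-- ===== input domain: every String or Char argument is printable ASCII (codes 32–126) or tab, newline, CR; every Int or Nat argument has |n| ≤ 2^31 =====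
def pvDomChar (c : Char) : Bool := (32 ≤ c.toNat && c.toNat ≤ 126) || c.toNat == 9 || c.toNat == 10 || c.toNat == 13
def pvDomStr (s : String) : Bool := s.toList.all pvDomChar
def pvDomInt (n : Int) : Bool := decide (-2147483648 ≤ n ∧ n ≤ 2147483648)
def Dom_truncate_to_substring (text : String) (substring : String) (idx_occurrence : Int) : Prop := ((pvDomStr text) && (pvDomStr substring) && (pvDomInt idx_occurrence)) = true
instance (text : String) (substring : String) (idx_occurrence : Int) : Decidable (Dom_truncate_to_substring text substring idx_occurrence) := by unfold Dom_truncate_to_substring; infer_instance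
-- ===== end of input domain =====

-- B replaces A's incremental find loop by collecting all (overlap-counted) occurrence start positions
-- in one comprehension and indexing the k-th one: simpler decomposition, same return value.

-- ===== PORT A =====
-- A's loop 'for _ in range(idx_occurrence): idx = text.find(substring, idx + 1); if idx == -1: return text'
-- followed by 'return text[:idx]', as structural recursion on the remaining iteration count.
def truncAAux (s sub : List Char) : Nat → Int → List Char
  | 0, idx => PySem.List.slice s none (some idx)
  | n + 1, idx =>
      let j := PySem.Chars.findFrom s sub (idx + 1) none
      if j = -1 then s else truncAAux s sub n j

def truncate_to_substring (text : String) (substring : String) (idx_occurrence : Int) : String :=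
  String.ofList (truncAAux text.toList substring.toList idx_occurrence.toNat (-1))

-- ===== PORT B =====
-- 'starts = [i for i in range(len(text)) if text.startswith(substring, i)]' — text.startswith(substring, i)
-- for 0 ≤ i < len(text) is exactly 'substring is a prefix of text[i:]', i.e. Chars.startswith (s.drop i) sub.
def truncate_to_substring_alt (text : String) (substring : String) (idx_occurrence : Int) : String :=
  let s := text.toList
  let starts := (List.range s.length).filter (fun i => PySem.Chars.startswith (s.drop i) substring.toList)
  if idx_occurrence ≤ (starts.length : Int) then
    -- 'text[:starts[idx_occurrence - 1]]' — the guard makes the index in range (Pre_ gives idx_occurrence ≥ 1)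
    String.ofList (PySem.List.slice s none (some ((starts.getD (idx_occurrence - 1).toNat 0 : Nat) : Int)))
  else text

-- ===== PRECONDITION & SPEC =====
-- A's 'assert idx_occurrence > 0' raises AssertionError otherwise; exactly those inputs are excluded.
def Pre_truncate_to_substring (text : String) (substring : String) (idx_occurrence : Int) : Prop :=
  0 < idx_occurrence
instance (text : String) (substring : String) (idx_occurrence : Int) : Decidable (Pre_truncate_to_substring text substring idx_occurrence) := by unfold Pre_truncate_to_substring; infer_instance

def pvWitness_truncate_to_substring : String × String × Int := ("abcabcabc", "bc", 2)

def Spec_truncate_to_substring (text : String) (substring : String) (idx_occurrence : Int) (out : String) : Prop := out = truncate_to_substring_alt text substring idx_occurrence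
instance (text : String) (substring : String) (idx_occurrence : Int) (out : String) : Decidable (Spec_truncate_to_substring text substring idx_occurrence out) := by unfold Spec_truncate_to_substring; infer_instance

-- ===== CLAIM (what is proved, stated in full; the proofs are below) =====
def Claim_equal_truncate_to_substring : Prop := ∀ (text : String) (substring : String) (idx_occurrence : Int), Dom_truncate_to_substring text substring idx_occurrence → Pre_truncate_to_substring text substring idx_occurrence → Spec_truncate_to_substring text substring idx_occurrence (truncate_to_substring text substring idx_occurrence)

-- ===== LEMMAS AND PROOFS =====

-- All positions i ≤ s.length at which sub starts in s (position s.length qualifies iff sub = []),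
-- in increasing order: the positions A's repeated 'find(sub, idx + 1)' steps through.
def pvOcc (s sub : List Char) : List Nat :=
  (List.range (s.length + 1)).filter (fun i => decide (sub <+: s.drop i))

theorem mem_pvOcc (s sub : List Char) (i : Nat) :
    i ∈ pvOcc s sub ↔ i ≤ s.length ∧ sub <+: s.drop i := by
  simp [pvOcc]

theorem pvOcc_pairwise (s sub : List Char) : (pvOcc s sub).Pairwise (· < ·) :=
  List.pairwise_lt_range.filter _

theorem infix_iff_drop (s sub : List Char) : sub <:+: s ↔ ∃ k, sub <+: s.drop k := by
  constructor
  · intro h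
    obtain ⟨t, hp, hs⟩ := List.infix_iff_prefix_suffix.mp h
    exact ⟨s.length - t.length, by rwa [← List.suffix_iff_eq_drop.mp hs]⟩
  · rintro ⟨k, hk⟩
    exact hk.isInfix.trans (s.drop_suffix k).isInfix

theorem findFrom_gt (s sub : List Char) (j : Nat) (h : s.length < j) :
    PySem.Chars.findFrom s sub (j : Int) none = -1 := by
  simp [PySem.Chars.findFrom]
  intro h1 _
  exfalso; omega

theorem filter_ge_cons {l : List Nat} (hp : l.Pairwise (· < ·)) {p j : Nat}
    (hmem : p ∈ l) (hjp : j ≤ p) (hmin : ∀ i ∈ l, j ≤ i → p ≤ i) :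
    l.filter (fun i => j ≤ i) = p :: l.filter (fun i => p + 1 ≤ i) := by
  induction l with
  | nil => cases hmem
  | cons a t ih =>
      rcases List.mem_cons.mp hmem with rfl | hpt
      · have hall : ∀ x ∈ t, p < x := (List.pairwise_cons.mp hp).1
        have hfilt : t.filter (fun i => decide (j ≤ i)) = t.filter (fun i => decide (p + 1 ≤ i)) :=
          List.filter_congr (fun x hx => decide_eq_decide.mpr (by have := hall x hx; omega))
        simp [hjp, hfilt]
      · have ha : a < p := (List.pairwise_cons.mp hp).1 p hpt
        have haj : ¬ j ≤ a := fun hja => absurd (hmin a (List.mem_cons_self) hja) (by omega)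
        simp only [List.filter_cons, decide_eq_true_eq]
        rw [if_neg haj, if_neg (by omega)]
        exact ih ((List.pairwise_cons.mp hp).2) hpt
          (fun i hi hji => hmin i (List.mem_cons_of_mem a hi) hji)

-- findFrom from start j against the suffix of pvOcc: either nothing remains and findFrom is -1,
-- or findFrom is the head and the loop continues with start head + 1.
theorem rem_cases (s sub : List Char) (j : Nat) (hj : j ≤ s.length + 1) :
    ((pvOcc s sub).filter (fun i => j ≤ i) = [] ∧ PySem.Chars.findFrom s sub (j : Int) none = -1)
    ∨ ∃ p rest, (pvOcc s sub).filter (fun i => j ≤ i) = p :: rest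
        ∧ PySem.Chars.findFrom s sub (j : Int) none = (p : Int)
        ∧ rest = (pvOcc s sub).filter (fun i => p + 1 ≤ i) ∧ p ≤ s.length := by
  by_cases hj1 : j = s.length + 1
  · left
    constructor
    · rw [List.filter_eq_nil_iff]
      intro i hi hdec
      have := (mem_pvOcc s sub i).mp hi
      simp only [decide_eq_true_eq] at hdec
      omega
    · exact findFrom_gt s sub j (by omega)
  · have hjl : j ≤ s.length := by omega
    by_cases hf : PySem.Chars.findFrom s sub (j : Int) none = -1
    · left
      refine ⟨?_, hf⟩
      have hne := (PySem.Chars.findFrom_natCast_eq_neg_one_iff s sub j hjl).mp hf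
      rw [List.filter_eq_nil_iff]
      intro i hi hdec
      obtain ⟨hile, hpre⟩ := (mem_pvOcc s sub i).mp hi
      simp only [decide_eq_true_eq] at hdec
      refine hne ((infix_iff_drop (s.drop j) sub).mpr ⟨i - j, ?_⟩)
      rw [List.drop_drop]
      have : j + (i - j) = i := by omega
      rw [this]; exact hpre
    · right
      obtain ⟨hjle, hpre, hmin⟩ := PySem.Chars.findFrom_natCast_spec s sub j hjl hf
      have hcast := PySem.Chars.findFrom_natCast s sub j hjl
      rw [if_neg (by intro hdf; rw [hcast, if_pos hdf] at hf; exact hf rfl)] at hcast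
      have hfind := PySem.Chars.find_le_length (s.drop j) sub
      rw [List.length_drop] at hfind
      have hfle : PySem.Chars.findFrom s sub (j : Int) none ≤ (s.length : Int) := by
        rw [hcast]; omega
      set f := PySem.Chars.findFrom s sub (j : Int) none with hfdef
      have hf0 : 0 ≤ f := le_trans (by positivity) hjle
      have hptoNat : ((f.toNat : Nat) : Int) = f := Int.toNat_of_nonneg hf0
      refine ⟨f.toNat, (pvOcc s sub).filter (fun i => f.toNat + 1 ≤ i), ?_, by omega, rfl, by omega⟩
      refine filter_ge_cons (pvOcc_pairwise s sub) ?_ (by omega) ?_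
      · exact (mem_pvOcc s sub f.toNat).mpr ⟨by omega, hpre⟩
      · intro i hi hji
        by_contra hlt
        obtain ⟨_, hpi⟩ := (mem_pvOcc s sub i).mp hi
        exact hmin i hji (by omega) hpi

theorem truncAAux_succ (s sub : List Char) (n : Nat) (idx : Int) :
    truncAAux s sub (n + 1) idx =
      if PySem.Chars.findFrom s sub (idx + 1) none = -1 then s
      else truncAAux s sub n (PySem.Chars.findFrom s sub (idx + 1) none) := rfl

-- The loop invariant: entering A's loop with n + 1 iterations left and search start j
-- returns the prefix up to the (n+1)-th remaining occurrence, or the whole text if none.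
theorem truncAAux_spec (s sub : List Char) : ∀ (n j : Nat), j ≤ s.length + 1 →
    truncAAux s sub (n + 1) ((j : Int) - 1) =
      (if h : n < ((pvOcc s sub).filter (fun i => j ≤ i)).length
       then s.take (((pvOcc s sub).filter (fun i => j ≤ i))[n])
       else s) := by
  intro n
  induction n with
  | zero =>
    intro j hj
    rw [truncAAux_succ, show ((j : Int) - 1) + 1 = (j : Int) by ring]
    rcases rem_cases s sub j hj with ⟨hnil, hf⟩ | ⟨p, rest, hcons, hf, hrest, hple⟩
    · rw [if_pos hf, hnil]; simp
    · rw [if_neg (by rw [hf]; omega), hf, hcons]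
      simp [truncAAux, PySem.List.slice_to_natCast]
  | succ m ih =>
    intro j hj
    rw [truncAAux_succ, show ((j : Int) - 1) + 1 = (j : Int) by ring]
    rcases rem_cases s sub j hj with ⟨hnil, hf⟩ | ⟨p, rest, hcons, hf, hrest, hple⟩
    · rw [if_pos hf, hnil]; simp
    · rw [if_neg (by rw [hf]; omega), hf,
        show (p : Int) = ((p + 1 : Nat) : Int) - 1 by omega,
        ih (p + 1) (by omega), hcons, ← hrest]
      rcases Nat.lt_or_ge m rest.length with hlt | hge
      · rw [dif_pos hlt, dif_pos (by simp; omega)]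
        simp
      · rw [dif_neg (by omega), dif_neg (by simp; omega)]

-- ===== VERDICT (by name: the statement is the Claim_ definition above) =====
theorem truncate_to_substring_spec : Claim_equal_truncate_to_substring := by
  intro text substring k _ hpre
  unfold Pre_truncate_to_substring at hpre
  obtain ⟨K, rfl⟩ : ∃ K : Nat, k = (K : Int) :=
    ⟨k.toNat, (Int.toNat_of_nonneg (le_of_lt hpre)).symm⟩
  have hK : 1 ≤ K := by exact_mod_cast hpre
  unfold Spec_truncate_to_substring truncate_to_substring truncate_to_substring_alt
  set s := text.toList with hs
  set sb := substring.toList with hsb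
  have hsw : (fun i => PySem.Chars.startswith (s.drop i) sb)
      = (fun i => decide (sb <+: s.drop i)) := by
    funext i
    rcases h : PySem.Chars.startswith (s.drop i) sb <;>
      simp [← PySem.Chars.startswith_iff, h]
  simp only [hsw]
  set occS := (List.range s.length).filter (fun i => decide (sb <+: s.drop i)) with hoccS
  have hKt : (K : Int).toNat = K := Int.toNat_natCast K
  have hKm1 : ((K : Int) - 1).toNat = K - 1 := by omega
  have hA : truncAAux s sb (K : Int).toNat (-1)
      = if h : K - 1 < ((pvOcc s sb).filter (fun i => 0 ≤ i)).length
        then s.take (((pvOcc s sb).filter (fun i => 0 ≤ i))[K - 1])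
        else s := by
    rw [hKt, show K = (K - 1) + 1 by omega, show (-1 : Int) = ((0 : Nat) : Int) - 1 by norm_num]
    exact truncAAux_spec s sb (K - 1) 0 (by omega)
  have hfilter0 : (pvOcc s sb).filter (fun i => 0 ≤ i) = pvOcc s sb :=
    List.filter_eq_self.mpr (by intro a _; simp)
  have hsplit : pvOcc s sb = occS ++ (if sb = [] then [s.length] else []) := by
    unfold pvOcc
    rw [List.range_succ, List.filter_append, hoccS]
    congr 1
    simp only [List.filter, List.drop_length, List.prefix_nil]
    split_ifs with h <;> simp [h]
  rw [hA, hfilter0, hsplit]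
  simp only [hKm1]
  by_cases hsb0 : sb = []
  · rw [if_pos hsb0]
    rcases Nat.lt_or_ge (K - 1) occS.length with hlt | hge
    · rw [dif_pos (by simp; omega), if_pos (by simp; omega)]
      rw [List.getElem_append_left hlt, PySem.List.slice_to_natCast,
        List.getD_eq_getElem occS 0 (by omega)]
    · rcases Nat.eq_or_lt_of_le hge with heq | hgt
      · rw [dif_pos (by simp; omega), if_neg (by simp; omega)]
        rw [List.getElem_append_right (by omega)]
        have h0 : K - 1 - occS.length = 0 := by omega
        simp only [h0, List.getElem_cons_zero]
        rw [List.take_length, String.ofList_toList]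
      · rw [dif_neg (by simp; omega), if_neg (by simp; omega)]
        simp [hs]
  · rw [if_neg hsb0, List.append_nil]
    rcases Nat.lt_or_ge (K - 1) occS.length with hlt | hge
    · rw [dif_pos hlt, if_pos (by exact_mod_cast by omega)]
      rw [PySem.List.slice_to_natCast, List.getD_eq_getElem occS 0 (by omega)]
    · rw [dif_neg (by omega), if_neg (by omega)]
      simp [hs]
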